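-- pv_equiv track=rewrite | github.com/WinstonSmith77/PythonScripts | failingTests.py | get_failing_tests
-- ===== SOURCE A (Python) =====
-- def get_failing_tests(lines):
--     block = None
--     for line in lines:
--
--         if 'RequestsReturningResult (1;' in line:
--             if block is not None:
--                 yield  (''.join(block))
--             block = []
--             block.append(line)
--         else:
--             pass
-- ===== SOURCE B (Python) =====
-- def get_failing_tests(lines):
--     markers = [line for line in lines if 'RequestsReturningResult (1;' in line]
--     yield from markers[:-1]
-- ===== Notes on version B (the rewrite author's own statement) =====
-- stated objective: simpler
-- what changed: Replaces the one-step-lagged streaming state machine (emit the previously buffered marker line when a new marker arrives) with a filter of marker lines followed by [:-1] to drop the final one.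
import Mathlib
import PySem

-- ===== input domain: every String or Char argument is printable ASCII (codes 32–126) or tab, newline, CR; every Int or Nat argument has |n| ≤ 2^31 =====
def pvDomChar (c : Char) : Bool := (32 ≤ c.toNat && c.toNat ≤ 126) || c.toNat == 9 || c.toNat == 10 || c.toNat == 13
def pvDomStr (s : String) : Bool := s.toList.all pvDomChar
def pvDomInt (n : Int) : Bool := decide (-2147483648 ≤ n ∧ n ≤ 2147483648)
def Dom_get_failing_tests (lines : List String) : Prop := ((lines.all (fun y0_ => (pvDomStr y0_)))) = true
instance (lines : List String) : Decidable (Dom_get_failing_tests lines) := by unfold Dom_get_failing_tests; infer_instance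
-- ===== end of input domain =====

-- B replaces A's one-step-lagged streaming state machine with filter-then-drop-last; return value only (A is a generator).


-- ===== PORT A =====
-- state: (block : Option (List String), yielded so far); 'yield' appends to the output list
def get_failing_tests (lines : List String) : List String :=
  (lines.foldl
    (fun (st : Option (List String) × List String) line =>
      if PySem.Str.isIn "RequestsReturningResult (1;" line then
        let out := match st.1 with
          | some block => st.2 ++ [PySem.Str.join "" block]
          | none => st.2
        (some ([] ++ [line]), out)
      else st)
    (none, [])).2

-- ===== PORT B =====
def get_failing_tests_alt (lines : List String) : List String :=
  let markers := lines.filter (fun line => PySem.Str.isIn "RequestsReturningResult (1;" line)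
  PySem.List.slice markers none (some (-1))

-- ===== PRECONDITION & SPEC =====
def Spec_get_failing_tests (lines : List String) (out : List String) : Prop := out = get_failing_tests_alt lines
instance (lines : List String) (out : List String) : Decidable (Spec_get_failing_tests lines out) := by unfold Spec_get_failing_tests; infer_instance

-- ===== CLAIM (what is proved, stated in full; the proofs are below) =====
def Claim_equal_get_failing_tests : Prop := ∀ (lines : List String), Dom_get_failing_tests lines → Spec_get_failing_tests lines (get_failing_tests lines)

-- ===== LEMMAS AND PROOFS =====

-- ''.join([l]) = l
lemma join_singleton_str (l : String) : PySem.Str.join "" [l] = l := by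
  simp [PySem.Str.join, PySem.Chars.join, List.intercalate]

-- the loop body, named for the invariant proofs
def pvStepA (st : Option (List String) × List String) (line : String) : Option (List String) × List String :=
  if PySem.Str.isIn "RequestsReturningResult (1;" line then
    let out := match st.1 with
      | some block => st.2 ++ [PySem.Str.join "" block]
      | none => st.2
    (some ([] ++ [line]), out)
  else st

def pvP (line : String) : Bool := PySem.Str.isIn "RequestsReturningResult (1;" line

-- invariant: from a buffered marker l, the fold yields out ++ dropLast (l :: markers of rest);
-- from an empty buffer, out ++ dropLast (markers of rest)
lemma pvFold_inv (lines : List String) :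
    (∀ out, (lines.foldl pvStepA (none, out)).2 = out ++ (lines.filter pvP).dropLast) ∧
    (∀ out l, (lines.foldl pvStepA (some [l], out)).2 = out ++ (l :: lines.filter pvP).dropLast) := by
  induction lines with
  | nil => simp
  | cons x xs ih =>
    constructor
    · intro out
      by_cases h : pvP x
      · simp only [List.foldl_cons, pvStepA, pvP] at *
        rw [if_pos h]
        simp only [List.nil_append]
        rw [(ih.2) out x, List.filter_cons, if_pos (show pvP x = true from h)]
      · simp only [List.foldl_cons, pvStepA, pvP] at *
        rw [if_neg h, (ih.1) out, List.filter_cons, if_neg (show ¬ pvP x = true from h)]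
    · intro out l
      by_cases h : pvP x
      · simp only [List.foldl_cons, pvStepA, pvP] at *
        rw [if_pos h]
        simp only [List.nil_append, join_singleton_str]
        rw [(ih.2) (out ++ [l]) x, List.filter_cons, if_pos (show pvP x = true from h)]
        simp [List.dropLast_cons_of_ne_nil]
      · simp only [List.foldl_cons, pvStepA, pvP] at *
        rw [if_neg h, (ih.2) out l, List.filter_cons, if_neg (show ¬ pvP x = true from h)]

-- ===== VERDICT (by name: the statement is the Claim_ definition above) =====
theorem get_failing_tests_spec : Claim_equal_get_failing_tests := by
  intro lines _
  unfold Spec_get_failing_tests get_failing_tests get_failing_tests_alt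
  have h : (lines.foldl
      (fun (st : Option (List String) × List String) line =>
        if PySem.Str.isIn "RequestsReturningResult (1;" line then
          let out := match st.1 with
            | some block => st.2 ++ [PySem.Str.join "" block]
            | none => st.2
          (some ([] ++ [line]), out)
        else st)
      (none, [])) = lines.foldl pvStepA (none, []) := rfl
  rw [h, (pvFold_inv lines).1 []]
  simp only [List.nil_append]
  rw [PySem.List.slice_to_neg_one]
  rfl
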